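-- pv_equiv track=rewrite | github.com/dizys/nyu-ai-lab-2 | solving/bnf.py | remove_sentence_with_atom_and_its_negation
-- ===== SOURCE A (Python) =====
-- from typing import Dict, List, Tuple
--
-- def remove_sentence_with_atom_and_its_negation(cnf_rep: List[List[Tuple[str, bool]]]) -> List[List[Tuple[str, bool]]]:
--     result: List[List[Tuple[str, bool]]] = []
--     for sentence in cnf_rep:
--         atom_dict: Dict[str, bool] = {}
--         is_sentence_valid = True
--         for atom_bound in sentence:
--             atom = atom_bound[0]
--             bound = atom_bound[1]
--             if atom in atom_dict:
--                 if atom_dict[atom] != bound: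
--                     is_sentence_valid = False
--                     break
--             else:
--                 atom_dict[atom] = bound
--         if is_sentence_valid:
--             result.append(sentence)
--     return result
-- ===== SOURCE B (Python) =====
-- from typing import List, Tuple
--
--
-- def remove_sentence_with_atom_and_its_negation(cnf_rep):
--     result = []
--     for sentence in cnf_rep:
--         pos = {atom for atom, bound in sentence if bound}
--         neg = {atom for atom, bound in sentence if not bound}
--         if pos.isdisjoint(neg):
--             result.append(sentence)
--     return result
-- ===== Notes on version B (the rewrite author's own statement) =====
-- stated objective: simpler
-- what changed: Replaces the incremental dict-with-early-break consistency scan per clause by two polarity partitions into sets and a single set-disjointness test.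
import Mathlib
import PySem

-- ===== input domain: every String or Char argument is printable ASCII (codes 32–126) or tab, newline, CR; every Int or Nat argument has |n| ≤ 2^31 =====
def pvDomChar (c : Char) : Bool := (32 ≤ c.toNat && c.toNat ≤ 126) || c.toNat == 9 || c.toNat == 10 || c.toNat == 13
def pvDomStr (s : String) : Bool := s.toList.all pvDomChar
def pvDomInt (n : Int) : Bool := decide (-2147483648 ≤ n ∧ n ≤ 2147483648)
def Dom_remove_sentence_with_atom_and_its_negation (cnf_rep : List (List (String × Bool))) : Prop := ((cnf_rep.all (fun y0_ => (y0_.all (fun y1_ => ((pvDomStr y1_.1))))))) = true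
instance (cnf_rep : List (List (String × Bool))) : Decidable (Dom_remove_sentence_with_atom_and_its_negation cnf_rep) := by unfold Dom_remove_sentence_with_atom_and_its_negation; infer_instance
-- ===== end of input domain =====

-- B replaces A's per-clause incremental dict scan (with early break) by partitioning each
-- clause's atoms into positive/negative sets and one disjointness test: simpler, same cost.


-- ===== PORT A =====
-- inner loop of A over one sentence: returns the final `is_sentence_valid` flag
-- (the `break` is the `false` result)
def pvCheckA : List (String × Bool) → PySem.Dict String Bool → Bool
  | [], _ => true
  | atom_bound :: rest, atom_dict =>
      let atom := atom_bound.1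
      let bound := atom_bound.2
      match atom_dict.get? atom with
      | some v => if v != bound then false else pvCheckA rest atom_dict
      | none => pvCheckA rest (atom_dict.insert atom bound)

def remove_sentence_with_atom_and_its_negation (cnf_rep : List (List (String × Bool))) : List (List (String × Bool)) :=
  cnf_rep.foldl
    (fun result sentence =>
      if pvCheckA sentence PySem.Dict.empty then result ++ [sentence] else result)
    []

-- ===== PORT B =====
def pvConsistentB (sentence : List (String × Bool)) : Bool :=
  let pos : PySem.Set String := PySem.Set.ofList ((sentence.filter (fun p => p.2)).map Prod.fst)
  let neg : PySem.Set String := PySem.Set.ofList ((sentence.filter (fun p => !p.2)).map Prod.fst)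
  PySem.Set.isdisjoint pos neg

def remove_sentence_with_atom_and_its_negation_alt (cnf_rep : List (List (String × Bool))) : List (List (String × Bool)) :=
  cnf_rep.foldl
    (fun result sentence =>
      if pvConsistentB sentence then result ++ [sentence] else result)
    []

-- ===== PRECONDITION & SPEC =====
def Spec_remove_sentence_with_atom_and_its_negation (cnf_rep : List (List (String × Bool))) (out : List (List (String × Bool))) : Prop := out = remove_sentence_with_atom_and_its_negation_alt cnf_rep
instance (cnf_rep : List (List (String × Bool))) (out : List (List (String × Bool))) : Decidable (Spec_remove_sentence_with_atom_and_its_negation cnf_rep out) := by unfold Spec_remove_sentence_with_atom_and_its_negation; infer_instance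

-- ===== CLAIM (what is proved, stated in full; the proofs are below) =====
def Claim_equal_remove_sentence_with_atom_and_its_negation : Prop := ∀ (cnf_rep : List (List (String × Bool))), Dom_remove_sentence_with_atom_and_its_negation cnf_rep → Spec_remove_sentence_with_atom_and_its_negation cnf_rep (remove_sentence_with_atom_and_its_negation cnf_rep)

-- ===== LEMMAS AND PROOFS =====

-- membership in one of B's polarity sets, as a statement about the clause
lemma pvMemPolaritySet (t : List (String × Bool)) (x : String) (f : (String × Bool) → Bool) :
    (PySem.Set.ofList ((t.filter f).map Prod.fst)).contains x = true ↔
      ∃ p, p ∈ t ∧ f p = true ∧ p.1 = x := by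
  simp only [PySem.Set.contains, List.contains_eq_mem, decide_eq_true_eq,
    PySem.Set.mem_ofList, List.mem_map, List.mem_filter]
  constructor
  · rintro ⟨p, ⟨hps, hpf⟩, hp1⟩; exact ⟨p, hps, hpf, hp1⟩
  · rintro ⟨p, hps, hpf, hp1⟩; exact ⟨p, ⟨hps, hpf⟩, hp1⟩

-- A clause passes A's scan (started from dict d) iff every literal is consistent with d
-- and no two literals of the clause carry the same atom with different polarity.
lemma pvCheckA_iff (s : List (String × Bool)) (d : PySem.Dict String Bool) :
    pvCheckA s d = true ↔
      ∀ p ∈ s, (∀ v, d.get? p.1 = some v → v = p.2) ∧ ∀ q ∈ s, q.1 = p.1 → q.2 = p.2 := by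
  induction s generalizing d with
  | nil => simp [pvCheckA]
  | cons hd rest ih =>
    obtain ⟨a, b⟩ := hd
    simp only [pvCheckA]
    rcases hget : d.get? a with _ | v
    · -- atom not yet in the dict: insert and continue
      rw [ih]
      constructor
      · intro h p hp
        rcases List.mem_cons.mp hp with hp | hp
        · subst hp
          refine ⟨?_, ?_⟩
          · intro v hv
            have hv' : d.get? a = some v := hv
            rw [hget] at hv'; cases hv'
          · intro q hq hq1
            rcases List.mem_cons.mp hq with hq | hq
            · subst hq; rfl
            · have hq1' : q.1 = a := hq1
              have := (h q hq).1 b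
              rw [PySem.Dict.get?_insert, if_pos hq1'] at this
              show q.2 = b
              exact (this rfl).symm
        · refine ⟨?_, ?_⟩
          · intro v hv
            by_cases hpa : p.1 = a
            · rw [hpa, hget] at hv; cases hv
            · have := (h p hp).1 v
              rw [PySem.Dict.get?_insert, if_neg hpa] at this
              exact this hv
          · intro q hq hq1
            rcases List.mem_cons.mp hq with hq | hq
            · subst hq
              have hpa : p.1 = a := hq1.symm
              have := (h p hp).1 b
              rw [PySem.Dict.get?_insert, if_pos hpa] at this
              show b = p.2
              exact this rfl
            · exact (h p hp).2 q hq hq1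
      · intro h p hp
        refine ⟨?_, ?_⟩
        · intro v hv
          rw [PySem.Dict.get?_insert] at hv
          by_cases hpa : p.1 = a
          · rw [if_pos hpa] at hv
            have hb : b = v := by injection hv
            subst hb
            have := (h (a, b) List.mem_cons_self).2 p (List.mem_cons_of_mem _ hp) hpa
            exact this.symm
          · rw [if_neg hpa] at hv
            exact (h p (List.mem_cons_of_mem _ hp)).1 v hv
        · intro q hq hq1
          exact (h p (List.mem_cons_of_mem _ hp)).2 q (List.mem_cons_of_mem _ hq) hq1
    · -- atom already present with value v
      by_cases hvb : v = b
      · subst hvb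
        simp only [bne_self_eq_false, Bool.false_eq_true, if_false, ih]
        constructor
        · intro h p hp
          rcases List.mem_cons.mp hp with hp | hp
          · subst hp
            refine ⟨?_, ?_⟩
            · intro w hw
              rw [hget] at hw
              injection hw with hw; exact hw.symm
            · intro q hq hq1
              rcases List.mem_cons.mp hq with hq | hq
              · subst hq; rfl
              · have hq1' : q.1 = a := hq1
                have := (h q hq).1 v
                rw [hq1', hget] at this
                show q.2 = v
                exact (this rfl).symm
          · refine ⟨(h p hp).1, ?_⟩
            intro q hq hq1
            rcases List.mem_cons.mp hq with hq | hq
            · subst hq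
              have hpa : p.1 = a := hq1.symm
              have := (h p hp).1 v
              rw [hpa, hget] at this
              show v = p.2
              exact this rfl
            · exact (h p hp).2 q hq hq1
        · intro h p hp
          refine ⟨(h p (List.mem_cons_of_mem _ hp)).1, ?_⟩
          intro q hq hq1
          exact (h p (List.mem_cons_of_mem _ hp)).2 q (List.mem_cons_of_mem _ hq) hq1
      · simp only [bne_iff_ne, ne_eq, hvb, not_false_eq_true, if_true,
          Bool.false_eq_true, false_iff]
        intro h
        exact hvb ((h (a, b) List.mem_cons_self).1 v hget)

-- B's disjointness test holds iff no atom occurs with both polarities.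
lemma pvConsistentB_iff (s : List (String × Bool)) :
    pvConsistentB s = true ↔ ∀ p ∈ s, ∀ q ∈ s, q.1 = p.1 → q.2 = p.2 := by
  simp only [pvConsistentB, PySem.Set.isdisjoint, Bool.not_eq_true', List.any_eq_false]
  constructor
  · intro h p hp q hq hq1
    rcases hb : p.2 with _ | _ <;> rcases hb' : q.2 with _ | _
    · rfl
    · -- q positive, p negative: p.1 is in both sets, contradicting disjointness
      exfalso
      have hx : p.1 ∈ PySem.Set.ofList ((s.filter (fun p => p.2)).map Prod.fst) := by
        rw [PySem.Set.mem_ofList]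
        exact List.mem_map.mpr ⟨q, List.mem_filter.mpr ⟨hq, by simp [hb']⟩, hq1⟩
      have hfalse := h _ hx
      have htrue := (pvMemPolaritySet s p.1 (fun p => !p.2)).mpr ⟨p, hp, by simp [hb], rfl⟩
      exact hfalse htrue
    · -- p positive, q negative
      exfalso
      have hx : q.1 ∈ PySem.Set.ofList ((s.filter (fun p => p.2)).map Prod.fst) := by
        rw [PySem.Set.mem_ofList]
        exact List.mem_map.mpr ⟨p, List.mem_filter.mpr ⟨hp, by simp [hb]⟩, hq1.symm⟩
      have hfalse := h _ hx
      have htrue := (pvMemPolaritySet s q.1 (fun p => !p.2)).mpr ⟨q, hq, by simp [hb'], rfl⟩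
      exact hfalse htrue
    · rfl
  · intro h x hx
    rw [PySem.Set.mem_ofList] at hx
    obtain ⟨p, hpf, hp1⟩ := List.mem_map.mp hx
    obtain ⟨hps, hp2⟩ := List.mem_filter.mp hpf
    intro hc
    obtain ⟨q, hqs, hq2, hq1⟩ := (pvMemPolaritySet s x (fun p => !p.2)).mp hc
    have := h p hps q hqs (by rw [hq1, hp1])
    rw [hp2] at this
    simp [this] at hq2

-- pointwise agreement of the two clause tests
lemma check_eq (s : List (String × Bool)) : pvCheckA s PySem.Dict.empty = pvConsistentB s := by
  rcases hB : pvConsistentB s with _ | _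
  · rcases hA : pvCheckA s PySem.Dict.empty with _ | _
    · rfl
    · exfalso
      apply absurd ((pvConsistentB_iff s).2 ?_) (by simp [hB])
      intro p hp q hq hq1
      exact ((pvCheckA_iff s PySem.Dict.empty).1 hA p hp).2 q hq hq1
  · apply (pvCheckA_iff s PySem.Dict.empty).2
    intro p hp
    refine ⟨?_, ((pvConsistentB_iff s).1 hB) p hp⟩
    intro v hv
    rw [PySem.Dict.get?_empty] at hv; cases hv

-- ===== VERDICT (by name: the statement is the Claim_ definition above) =====
theorem remove_sentence_with_atom_and_its_negation_spec : Claim_equal_remove_sentence_with_atom_and_its_negation := by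
  intro cnf_rep _
  show _ = _
  unfold remove_sentence_with_atom_and_its_negation remove_sentence_with_atom_and_its_negation_alt
  induction cnf_rep using List.reverseRecOn with
  | nil => rfl
  | append_singleton init s ih => simp [List.foldl_append, check_eq]
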